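-- pv_equiv track=rewrite | github.com/wyatt-avilla/leetcode | python/minimum-number-of-people-to-teach.py | teachings_needed_for
-- ===== SOURCE A (Python) =====
-- def teachings_needed_for(
--     language: int,
--     languages: list[set[int]],
--     friendships: list[list[int]],
-- ) -> int:
--     need_teaching = set()
--
--     for u, v in friendships:
--         if not (languages[u] & languages[v]):
--             if language not in languages[u]:
--                 need_teaching.add(u)
--             if language not in languages[v]:
--                 need_teaching.add(v)
--
--     return len(need_teaching)
-- ===== SOURCE B (Python) =====
-- def teachings_needed_for(
--     language: int,
--     languages: list[set[int]],
--     friendships: list[list[int]],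
-- ) -> int:
--     people = {p for pair in friendships for p in pair}
--
--     def must_learn(p):
--         if language in languages[p]:
--             return False
--         return any(
--             (p == u or p == v) and not (languages[u] & languages[v])
--             for u, v in friendships
--         )
--
--     return sum(map(must_learn, people))
-- ===== Notes on version B (the rewrite author's own statement) =====
-- stated objective: alternative
-- what changed: Inverts the iteration: instead of A's single pass over edges accumulating a need_teaching set, B enumerates the distinct people appearing in any friendship and, for each person lacking the language, searches all friendships for a disjoint pair containing them (candidate enumeration + existential scan, quadratic in E).
import Mathlib
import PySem

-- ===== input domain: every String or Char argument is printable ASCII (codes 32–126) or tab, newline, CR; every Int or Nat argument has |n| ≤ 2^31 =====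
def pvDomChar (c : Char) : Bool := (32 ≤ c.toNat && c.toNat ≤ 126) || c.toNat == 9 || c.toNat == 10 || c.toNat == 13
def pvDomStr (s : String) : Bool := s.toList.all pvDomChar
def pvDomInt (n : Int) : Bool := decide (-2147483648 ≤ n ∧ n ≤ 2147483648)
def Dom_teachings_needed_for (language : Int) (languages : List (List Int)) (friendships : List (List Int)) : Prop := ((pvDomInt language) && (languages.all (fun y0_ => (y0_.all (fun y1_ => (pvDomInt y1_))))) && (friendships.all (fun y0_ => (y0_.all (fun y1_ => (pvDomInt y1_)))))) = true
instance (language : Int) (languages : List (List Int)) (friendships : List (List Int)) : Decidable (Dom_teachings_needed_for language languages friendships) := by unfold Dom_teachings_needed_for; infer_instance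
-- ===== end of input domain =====

-- B inverts the iteration: it enumerates the distinct endpoints and, per person,
-- scans all friendships for a disjoint pair containing them (alternative algorithm, not faster).


-- ===== PORT A =====
-- literal port of A: one loop over friendships; for each language-disjoint pair,
-- each endpoint lacking `language` is added to the set need_teaching; return its size.
-- (Outside Pre_ — a pair of wrong arity or an out-of-range index, where Python raises —
-- the port skips the pair / uses [] for the missing row; Pre_ excludes those inputs.)
def teachings_needed_for (language : Int) (languages : List (List Int)) (friendships : List (List Int)) : Int :=
  let need_teaching :=
    friendships.foldl (fun (need_teaching : PySem.Set Int) f =>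
      match f with
      | [u, v] =>
        let lu := (PySem.List.pyGet? languages u).getD []
        let lv := (PySem.List.pyGet? languages v).getD []
        if (PySem.Set.inter lu lv).isEmpty then
          let need_teaching := if !(lu.contains language) then PySem.Set.add need_teaching u else need_teaching
          if !(lv.contains language) then PySem.Set.add need_teaching v else need_teaching
        else need_teaching
      | _ => need_teaching) PySem.Set.empty
  PySem.Set.len need_teaching

-- ===== PORT B =====
-- helper must_learn(p): False if p knows `language`, else any(...) scan over friendships
-- for a language-disjoint pair containing p ('for u, v in ...': non-pair rows are outside Pre_).
def pvMustLearn (language : Int) (languages : List (List Int)) (friendships : List (List Int)) (p : Int) : Bool :=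
  if ((PySem.List.pyGet? languages p).getD []).contains language then false
  else
    friendships.any (fun f =>
      -- 'for u, v in friendships' (pairs only; other arities are outside Pre_)
      if f.length = 2 then
        (p == f.getD 0 0 || p == f.getD 1 0) &&
          (PySem.Set.inter ((PySem.List.pyGet? languages (f.getD 0 0)).getD [])
                           ((PySem.List.pyGet? languages (f.getD 1 0)).getD [])).isEmpty
      else false)

-- people = {p for pair in friendships for p in pair}; return sum(map(must_learn, people))
-- (sum of booleans over a set is order-independent: it is the count of members satisfying must_learn).
def teachings_needed_for_alt (language : Int) (languages : List (List Int)) (friendships : List (List Int)) : Int :=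
  let people : PySem.Set Int :=
    friendships.foldl (fun s pair => PySem.Set.update s pair) PySem.Set.empty
  Int.ofNat (people.countP (pvMustLearn language languages friendships))

-- ===== PRECONDITION & SPEC =====
-- Pre_: exactly where Python A returns — every friendship is a pair [u, v] whose
-- two indices are valid (possibly negative, Python wraparound) for `languages`;
-- otherwise A raises ValueError (unpacking) or IndexError.
def Pre_teachings_needed_for (language : Int) (languages : List (List Int)) (friendships : List (List Int)) : Prop :=
  ∀ f ∈ friendships, f.length = 2 ∧
    (PySem.List.pyGet? languages (f.getD 0 0)).isSome ∧
    (PySem.List.pyGet? languages (f.getD 1 0)).isSome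
instance (language : Int) (languages : List (List Int)) (friendships : List (List Int)) : Decidable (Pre_teachings_needed_for language languages friendships) := by unfold Pre_teachings_needed_for; infer_instance

def pvWitness_teachings_needed_for : Int × List (List Int) × List (List Int) :=
  (1, [[1, 2], [3], [2, 3]], [[0, 1], [1, 2]])

def Spec_teachings_needed_for (language : Int) (languages : List (List Int)) (friendships : List (List Int)) (out : Int) : Prop := out = teachings_needed_for_alt language languages friendships
instance (language : Int) (languages : List (List Int)) (friendships : List (List Int)) (out : Int) : Decidable (Spec_teachings_needed_for language languages friendships out) := by unfold Spec_teachings_needed_for; infer_instance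

-- ===== CLAIM (what is proved, stated in full; the proofs are below) =====
def Claim_equal_teachings_needed_for : Prop := ∀ (language : Int) (languages : List (List Int)) (friendships : List (List Int)), Dom_teachings_needed_for language languages friendships → Pre_teachings_needed_for language languages friendships → Spec_teachings_needed_for language languages friendships (teachings_needed_for language languages friendships)

-- ===== LEMMAS AND PROOFS =====

-- abbreviation for A's loop body (proof-side only; the port spells it out literally)
def pvStepA (language : Int) (languages : List (List Int)) (s : PySem.Set Int) (f : List Int) : PySem.Set Int :=
  match f with
  | [u, v] =>
    let lu := (PySem.List.pyGet? languages u).getD []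
    let lv := (PySem.List.pyGet? languages v).getD []
    if (PySem.Set.inter lu lv).isEmpty then
      let s := if !(lu.contains language) then PySem.Set.add s u else s
      if !(lv.contains language) then PySem.Set.add s v else s
    else s
  | _ => s

theorem pv_stepA_nodup (language : Int) (languages : List (List Int)) (s : PySem.Set Int) (f : List Int)
    (h : s.Nodup) : (pvStepA language languages s f).Nodup := by
  unfold pvStepA
  match f with
  | [] => exact h
  | [_] => exact h
  | _ :: _ :: _ :: _ => exact h
  | [u, v] =>
    simp only
    split_ifs <;>
      first
        | exact h
        | exact PySem.Set.nodup_add _ _ h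
        | exact PySem.Set.nodup_add _ _ (PySem.Set.nodup_add _ _ h)

theorem pv_foldA_nodup (language : Int) (languages : List (List Int)) (fs : List (List Int))
    (s : PySem.Set Int) (h : s.Nodup) :
    (fs.foldl (pvStepA language languages) s).Nodup := by
  induction fs generalizing s with
  | nil => exact h
  | cons f fs ih => exact ih _ (pv_stepA_nodup language languages s f h)

-- membership after one step of A's loop
theorem pv_mem_stepA (language : Int) (languages : List (List Int)) (s : PySem.Set Int)
    (f : List Int) (x : Int) :
    x ∈ pvStepA language languages s f ↔
      x ∈ s ∨
        (¬ ((PySem.List.pyGet? languages x).getD []).contains language = true ∧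
          ∃ u v, f = [u, v] ∧ (x = u ∨ x = v) ∧
            (PySem.Set.inter ((PySem.List.pyGet? languages u).getD [])
                             ((PySem.List.pyGet? languages v).getD [])).isEmpty = true) := by
  unfold pvStepA
  match f with
  | [] => simp
  | [_] => simp
  | _ :: _ :: _ :: _ => simp
  | [u, v] =>
    simp only
    split_ifs with hd h1 h2 h2
    · -- v lacks and u lacks: both endpoints added
      simp only [PySem.Set.mem_add]
      constructor
      · rintro ((hs | rfl) | rfl)
        · exact Or.inl hs
        · exact Or.inr ⟨by simpa using h2, x, v, rfl, Or.inl rfl, hd⟩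
        · exact Or.inr ⟨by simpa using h1, u, x, rfl, Or.inr rfl, hd⟩
      · rintro (hs | ⟨hl, a, b, hab, hx, _⟩)
        · exact Or.inl (Or.inl hs)
        · cases hab
          rcases hx with rfl | rfl
          · exact Or.inl (Or.inr rfl)
          · exact Or.inr rfl
    · -- only v lacks: only v added
      simp only [PySem.Set.mem_add]
      constructor
      · rintro (hs | rfl)
        · exact Or.inl hs
        · exact Or.inr ⟨by simpa using h1, u, x, rfl, Or.inr rfl, hd⟩
      · rintro (hs | ⟨hl, a, b, hab, hx, _⟩)
        · exact Or.inl hs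
        · cases hab
          rcases hx with rfl | rfl
          · exact absurd (by simpa using h2) hl
          · exact Or.inr rfl
    · -- only u lacks: only u added
      simp only [PySem.Set.mem_add]
      constructor
      · rintro (hs | rfl)
        · exact Or.inl hs
        · exact Or.inr ⟨by simpa using h2, x, v, rfl, Or.inl rfl, hd⟩
      · rintro (hs | ⟨hl, a, b, hab, hx, _⟩)
        · exact Or.inl hs
        · cases hab
          rcases hx with rfl | rfl
          · exact Or.inr rfl
          · exact absurd (by simpa using h1) hl
    · -- neither lacks: nothing added
      constructor
      · exact Or.inl
      · rintro (hs | ⟨hl, a, b, hab, hx, _⟩)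
        · exact hs
        · cases hab
          rcases hx with rfl | rfl
          · exact absurd (by simpa using h2) hl
          · exact absurd (by simpa using h1) hl
    · -- pair not disjoint
      constructor
      · exact Or.inl
      · rintro (hs | ⟨hl, a, b, hab, hx, hd'⟩)
        · exact hs
        · cases hab
          exact absurd hd' hd

-- membership in A's accumulated set
theorem pv_mem_foldA (language : Int) (languages : List (List Int)) (fs : List (List Int))
    (s : PySem.Set Int) (x : Int) :
    x ∈ fs.foldl (pvStepA language languages) s ↔
      x ∈ s ∨
        (¬ ((PySem.List.pyGet? languages x).getD []).contains language = true ∧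
          ∃ u v, [u, v] ∈ fs ∧ (x = u ∨ x = v) ∧
            (PySem.Set.inter ((PySem.List.pyGet? languages u).getD [])
                             ((PySem.List.pyGet? languages v).getD [])).isEmpty = true) := by
  induction fs generalizing s with
  | nil => simp
  | cons f fs ih =>
    rw [List.foldl_cons, ih, pv_mem_stepA]
    constructor
    · rintro ((hs | ⟨hl, u, v, rfl, hx, hd⟩) | ⟨hl, u, v, hm, hx, hd⟩)
      · exact Or.inl hs
      · exact Or.inr ⟨hl, u, v, List.mem_cons_self, hx, hd⟩
      · exact Or.inr ⟨hl, u, v, List.mem_cons_of_mem _ hm, hx, hd⟩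
    · rintro (hs | ⟨hl, u, v, hm, hx, hd⟩)
      · exact Or.inl (Or.inl hs)
      · rcases List.mem_cons.mp hm with rfl | hm
        · exact Or.inl (Or.inr ⟨hl, u, v, rfl, hx, hd⟩)
        · exact Or.inr ⟨hl, u, v, hm, hx, hd⟩

-- membership in B's people set
theorem pv_mem_people (fs : List (List Int)) (s : PySem.Set Int) (x : Int) :
    x ∈ fs.foldl (fun s pair => PySem.Set.update s pair) s ↔ x ∈ s ∨ ∃ f ∈ fs, x ∈ f := by
  induction fs generalizing s with
  | nil => simp
  | cons f fs ih =>
    rw [List.foldl_cons, ih]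
    simp only [PySem.Set.mem_update, List.mem_cons]
    constructor
    · rintro ((h | h) | ⟨g, hg, hx⟩)
      · exact Or.inl h
      · exact Or.inr ⟨f, Or.inl rfl, h⟩
      · exact Or.inr ⟨g, Or.inr hg, hx⟩
    · rintro (h | ⟨g, rfl | hg, hx⟩)
      · exact Or.inl (Or.inl h)
      · exact Or.inl (Or.inr hx)
      · exact Or.inr ⟨g, hg, hx⟩

theorem pv_people_nodup (fs : List (List Int)) (s : PySem.Set Int) (h : s.Nodup) :
    (fs.foldl (fun s pair => PySem.Set.update s pair) s).Nodup := by
  induction fs generalizing s with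
  | nil => exact h
  | cons f fs ih => exact ih _ (PySem.Set.nodup_update _ _ h)

-- must_learn as a proposition
theorem pv_mustLearn_iff (language : Int) (languages : List (List Int)) (fs : List (List Int)) (p : Int) :
    pvMustLearn language languages fs p = true ↔
      (¬ ((PySem.List.pyGet? languages p).getD []).contains language = true ∧
        ∃ u v, [u, v] ∈ fs ∧ (p = u ∨ p = v) ∧
          (PySem.Set.inter ((PySem.List.pyGet? languages u).getD [])
                           ((PySem.List.pyGet? languages v).getD [])).isEmpty = true) := by
  unfold pvMustLearn
  split_ifs with hk
  · simp only [false_iff, not_and]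
    intro hl
    exact absurd hk hl
  · rw [List.any_eq_true]
    constructor
    · rintro ⟨f, hf, hb⟩
      refine ⟨hk, ?_⟩
      split_ifs at hb with h2
      · obtain ⟨u, v, rfl⟩ := List.length_eq_two.mp h2
        simp only [List.getD_cons_zero, List.getD_cons_succ, Bool.and_eq_true,
          Bool.or_eq_true, beq_iff_eq] at hb
        exact ⟨u, v, hf, hb.1, hb.2⟩
    · rintro ⟨_, u, v, hm, hx, hd⟩
      refine ⟨[u, v], hm, ?_⟩
      rw [if_pos (show ([u, v] : List Int).length = 2 from rfl)]
      simp only [List.getD_cons_zero, List.getD_cons_succ, Bool.and_eq_true,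
        Bool.or_eq_true, beq_iff_eq]
      exact ⟨hx, hd⟩

-- ===== VERDICT (by name: the statement is the Claim_ definition above) =====
theorem teachings_needed_for_spec : Claim_equal_teachings_needed_for := by
  intro language languages friendships _ _
  unfold Spec_teachings_needed_for teachings_needed_for teachings_needed_for_alt
  simp only
  -- A's fold is literally a fold of pvStepA
  have hfold : (friendships.foldl (fun (need_teaching : PySem.Set Int) f =>
      match f with
      | [u, v] =>
        let lu := (PySem.List.pyGet? languages u).getD []
        let lv := (PySem.List.pyGet? languages v).getD []
        if (PySem.Set.inter lu lv).isEmpty then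
          let need_teaching := if !(lu.contains language) then PySem.Set.add need_teaching u else need_teaching
          if !(lv.contains language) then PySem.Set.add need_teaching v else need_teaching
        else need_teaching
      | _ => need_teaching) PySem.Set.empty)
      = friendships.foldl (pvStepA language languages) PySem.Set.empty := by
    rfl
  rw [hfold]
  set A := friendships.foldl (pvStepA language languages) PySem.Set.empty with hA
  set P := friendships.foldl (fun s pair => PySem.Set.update s pair) PySem.Set.empty with hP
  have hAn : A.Nodup := pv_foldA_nodup _ _ _ _ List.nodup_nil
  have hBn : (P.filter (pvMustLearn language languages friendships)).Nodup :=
    (pv_people_nodup _ _ List.nodup_nil).filter _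
  have hmem : ∀ x, x ∈ A ↔ x ∈ P.filter (pvMustLearn language languages friendships) := by
    intro x
    rw [hA, pv_mem_foldA]
    rw [List.mem_filter, hP, pv_mem_people, pv_mustLearn_iff]
    constructor
    · rintro (h | ⟨hl, u, v, hm, hx, hd⟩)
      · simp at h
      · refine ⟨Or.inr ⟨[u, v], hm, ?_⟩, hl, u, v, hm, hx, hd⟩
        rcases hx with rfl | rfl <;> simp
    · rintro ⟨_, hl, u, v, hm, hx, hd⟩
      exact Or.inr ⟨hl, u, v, hm, hx, hd⟩
  have hperm : A.Perm (P.filter (pvMustLearn language languages friendships)) :=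
    (List.perm_ext_iff_of_nodup hAn hBn).mpr hmem
  have hlen := hperm.length_eq
  simp only [PySem.Set.len, List.countP_eq_length_filter]
  exact congrArg Int.ofNat hlen
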